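-- pv_equiv track=rewrite | github.com/DragunWF/Competitive-Programming | CodeWars/python/6_kyu/reverse_vowels_in_a_string.py | reverse_vowels_in_sentence
-- ===== SOURCE A (Python) =====
-- def reverse_vowels_in_sentence(sentence: str, vowels: list[str], positions: list[int]) -> str:
--     vowels.reverse()
--     reversed = []
--     current_vowel_index = 0
--     for i, char in enumerate(sentence):
--         if i in positions:
--             reversed.append(vowels[current_vowel_index])
--             current_vowel_index += 1
--             continue
--         reversed.append(char)
--     return "".join(reversed)
-- ===== SOURCE B (Python) =====
-- def reverse_vowels_in_sentence(sentence: str, vowels: list[str], positions: list[int]) -> str: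
--     vowels.reverse()
--     ps = sorted({p for p in positions if 0 <= p < len(sentence)})
--     chars = list(sentence)
--     for k, p in enumerate(ps):
--         chars[p] = vowels[k]
--     return "".join(chars)
-- ===== Notes on version B (the rewrite author's own statement) =====
-- stated objective: simpler
-- what changed: Instead of scanning every character and testing 'i in positions' with a running vowel counter, B sorts the distinct in-range positions once and scatters the reversed vowels directly onto those slots of list(sentence).
import Mathlib
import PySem

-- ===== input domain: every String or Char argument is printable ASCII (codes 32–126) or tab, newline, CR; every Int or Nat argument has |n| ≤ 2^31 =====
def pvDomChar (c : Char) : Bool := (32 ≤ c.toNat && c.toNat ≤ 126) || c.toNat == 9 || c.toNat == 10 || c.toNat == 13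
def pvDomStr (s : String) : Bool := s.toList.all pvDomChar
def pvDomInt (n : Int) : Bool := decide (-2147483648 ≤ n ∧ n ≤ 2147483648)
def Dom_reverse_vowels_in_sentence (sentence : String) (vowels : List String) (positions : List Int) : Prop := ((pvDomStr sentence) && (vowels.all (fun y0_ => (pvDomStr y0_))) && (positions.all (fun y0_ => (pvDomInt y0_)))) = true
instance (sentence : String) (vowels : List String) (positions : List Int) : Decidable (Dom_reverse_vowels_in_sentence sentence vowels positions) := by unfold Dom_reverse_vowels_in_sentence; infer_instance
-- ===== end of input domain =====

-- B replaces A's per-character scan (with its 'i in positions' test and running vowel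
-- counter) by sorting the distinct in-range positions and scattering the reversed vowels
-- onto those slots of the character list: a different, simpler decomposition.
-- Note: both A and B reverse the 'vowels' list argument IN PLACE (same side effect);
-- the equivalence proved here is about the return value.

-- ===== PORT A =====
def reverse_vowels_in_sentence (sentence : String) (vowels : List String) (positions : List Int) : String :=
  let vowels' := vowels.reverse
  let res := (PySem.List.enumerate sentence.toList).foldl
    (fun (st : List String × Nat) (ic : Int × Char) =>
      if ic.1 ∈ positions then (st.1 ++ [vowels'.getD st.2 ""], st.2 + 1)
      else (st.1 ++ [String.mk [ic.2]], st.2)) ([], 0)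
  String.join res.1

-- ===== PORT B =====
def reverse_vowels_in_sentence_alt (sentence : String) (vowels : List String) (positions : List Int) : String :=
  let vowels' := vowels.reverse
  let n : Int := (sentence.toList.length : Int)
  let ps : List Int :=
    PySem.List.sorted (PySem.Set.ofList (positions.filter (fun p => decide (0 ≤ p ∧ p < n)))) (fun x => x) false
  let chars := (PySem.List.enumerate ps).foldl
    (fun (chs : List String) (kp : Int × Int) => chs.set kp.2.toNat (vowels'.getD kp.1.toNat ""))
    (sentence.toList.map (fun c => String.mk [c]))
  String.join chars

-- ===== PRECONDITION & SPEC =====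
-- Pre_ excludes exactly the inputs on which Python A raises IndexError (more distinct
-- in-range positions than vowels); Python B raises the same IndexError there.
def Pre_reverse_vowels_in_sentence (sentence : String) (vowels : List String) (positions : List Int) : Prop :=
  (PySem.List.dedup (positions.filter (fun p => decide (0 ≤ p ∧ p < (sentence.toList.length : Int))))).length ≤ vowels.length
instance (sentence : String) (vowels : List String) (positions : List Int) : Decidable (Pre_reverse_vowels_in_sentence sentence vowels positions) := by unfold Pre_reverse_vowels_in_sentence; infer_instance

def pvWitness_reverse_vowels_in_sentence : String × List String × List Int :=
  ("hello there", ["e", "e", "e"], [1, 4, 9, 1, -2, 50])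

def Spec_reverse_vowels_in_sentence (sentence : String) (vowels : List String) (positions : List Int) (out : String) : Prop := out = reverse_vowels_in_sentence_alt sentence vowels positions
instance (sentence : String) (vowels : List String) (positions : List Int) (out : String) : Decidable (Spec_reverse_vowels_in_sentence sentence vowels positions out) := by unfold Spec_reverse_vowels_in_sentence; infer_instance

-- ===== CLAIM (what is proved, stated in full; the proofs are below) =====
def Claim_equal_reverse_vowels_in_sentence : Prop := ∀ (sentence : String) (vowels : List String) (positions : List Int), Dom_reverse_vowels_in_sentence sentence vowels positions → Pre_reverse_vowels_in_sentence sentence vowels positions → Spec_reverse_vowels_in_sentence sentence vowels positions (reverse_vowels_in_sentence sentence vowels positions)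

-- ===== LEMMAS AND PROOFS =====

-- A's loop body, as a structural recursion over the enumerated character list.
def goA (positions : List Int) (vs : List String) : List (Int × Char) → Nat → List String
  | [], _ => []
  | ic :: rest, k =>
    if ic.1 ∈ positions then vs.getD k "" :: goA positions vs rest (k + 1)
    else String.mk [ic.2] :: goA positions vs rest k

-- number of matched indices among s, s+1, …, s+j-1
def countM (positions : List Int) (s : Int) (j : Nat) : Nat :=
  (List.range j).countP (fun t : Nat => decide ((s + (t : Int)) ∈ positions))

theorem foldA_eq_goA (positions : List Int) (vs : List String) :
    ∀ (l : List (Int × Char)) (acc : List String) (k : Nat),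
      (l.foldl (fun (st : List String × Nat) (ic : Int × Char) =>
          if ic.1 ∈ positions then (st.1 ++ [vs.getD st.2 ""], st.2 + 1)
          else (st.1 ++ [String.mk [ic.2]], st.2)) (acc, k)).1
        = acc ++ goA positions vs l k := by
  intro l
  induction l with
  | nil => intro acc k; simp [goA]
  | cons ic rest ih =>
      intro acc k
      rw [List.foldl_cons]
      by_cases h : ic.1 ∈ positions
      · rw [if_pos h, ih, goA, if_pos h, List.append_assoc]; rfl
      · rw [if_neg h, ih, goA, if_neg h, List.append_assoc]; rfl

theorem length_goA (positions : List Int) (vs : List String) :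
    ∀ (l : List (Int × Char)) (k : Nat), (goA positions vs l k).length = l.length := by
  intro l
  induction l with
  | nil => intro k; simp [goA]
  | cons ic rest ih => intro k; by_cases h : ic.1 ∈ positions <;> simp [goA, h, ih]

theorem countM_succ (positions : List Int) (s : Int) (j : Nat) :
    countM positions s (j + 1)
      = (if s ∈ positions then 1 else 0) + countM positions (s + 1) j := by
  unfold countM
  rw [List.range_succ_eq_map, List.countP_cons, List.countP_map]
  have hc : (List.range j).countP
        ((fun t : Nat => decide ((s + (t : Int)) ∈ positions)) ∘ Nat.succ)
      = (List.range j).countP (fun t : Nat => decide ((s + 1 + (t : Int)) ∈ positions)) := by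
    apply List.countP_congr
    intro t _
    have h : s + ((Nat.succ t : Nat) : Int) = s + 1 + (t : Int) := by push_cast; ring
    simp only [Function.comp_apply, h]
  rw [hc]
  by_cases h : s ∈ positions <;> simp [h] <;> omega

theorem getElem?_goA (positions : List Int) (vs : List String) :
    ∀ (cs : List Char) (s : Int) (k j : Nat), j < cs.length →
      (goA positions vs (PySem.List.enumerate cs s) k)[j]?
        = some (if (s + (j : Int)) ∈ positions then vs.getD (k + countM positions s j) ""
                else String.mk [cs.getD j 'a']) := by
  intro cs
  induction cs with
  | nil => intro s k j hj; simp at hj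
  | cons c cs' ih =>
      intro s k j hj
      rw [PySem.List.enumerate_cons]
      cases j with
      | zero =>
          by_cases h : s ∈ positions <;> simp [goA, h, countM]
      | succ j =>
          have hj' : j < cs'.length := by
            simp only [List.length_cons] at hj; omega
          have harith : s + 1 + (j : Int) = s + (((j : Nat) + 1 : Nat) : Int) := by push_cast; ring
          by_cases h : s ∈ positions
          · rw [goA, if_pos h, List.getElem?_cons_succ, ih (s + 1) (k + 1) j hj',
              countM_succ, if_pos h, harith]
            have hk : k + (1 + countM positions (s + 1) j)
                = k + 1 + countM positions (s + 1) j := by omega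
            rw [hk, List.getD_cons_succ]
          · rw [goA, if_neg h, List.getElem?_cons_succ, ih (s + 1) k j hj',
              countM_succ, if_neg h, harith]
            simp [List.getD_cons_succ]

-- B's scatter loop keeps the length of the character list.
theorem length_foldB (vs : List String) :
    ∀ (ps : List Int) (s : Int) (base : List String),
      ((PySem.List.enumerate ps s).foldl
          (fun (chs : List String) (kp : Int × Int) => chs.set kp.2.toNat (vs.getD kp.1.toNat ""))
          base).length = base.length := by
  intro ps
  induction ps with
  | nil => intro s base; simp
  | cons p rest ih =>
      intro s base
      rw [PySem.List.enumerate_cons, List.foldl_cons, ih]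
      simp [List.length_set]

-- B's scatter loop, characterised pointwise.
theorem getElem?_foldB (vs : List String) :
    ∀ (ps : List Int) (s : Nat) (base : List String),
      ps.Nodup → (∀ p ∈ ps, 0 ≤ p) → ∀ j : Nat, j < base.length →
      ((PySem.List.enumerate ps (s : Int)).foldl
          (fun (chs : List String) (kp : Int × Int) => chs.set kp.2.toNat (vs.getD kp.1.toNat ""))
          base)[j]?
        = some (if (j : Int) ∈ ps then vs.getD (s + ps.idxOf (j : Int)) "" else base.getD j "") := by
  intro ps
  induction ps with
  | nil =>
      intro s base _ _ j hj
      simp [List.getD_eq_getElem?_getD, List.getElem?_eq_getElem hj]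
  | cons p rest ih =>
      intro s base hnd hpos j hj
      rw [PySem.List.enumerate_cons, List.foldl_cons]
      have hcast : (s : Int) + 1 = ((s + 1 : Nat) : Int) := by push_cast; ring
      have hp0 : 0 ≤ p := hpos p List.mem_cons_self
      have hpn : p ∉ rest := (List.nodup_cons.mp hnd).1
      have hnd' : rest.Nodup := (List.nodup_cons.mp hnd).2
      have hpos' : ∀ q ∈ rest, 0 ≤ q := fun q hq => hpos q (List.mem_cons_of_mem _ hq)
      have hlen' : j < (base.set p.toNat (vs.getD ((s : Int)).toNat "")).length := by
        simpa [List.length_set] using hj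
      rw [hcast, ih (s + 1) _ hnd' hpos' j hlen']
      by_cases hjr : (j : Int) ∈ rest
      · have hjp : p ≠ (j : Int) := fun h => hpn (h ▸ hjr)
        have hmem : (j : Int) ∈ p :: rest := List.mem_cons_of_mem _ hjr
        rw [if_pos hjr, if_pos hmem]
        have hb : (p == (j : Int)) = false := beq_eq_false_iff_ne.mpr hjp
        have hidx : (p :: rest).idxOf (j : Int) = rest.idxOf (j : Int) + 1 := by
          rw [List.idxOf_cons, hb, cond_false]
        rw [hidx]
        congr 2
        omega
      · by_cases hjp : (j : Int) = p
        · have hpj : p.toNat = j := by omega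
          have hmem : (j : Int) ∈ p :: rest := by rw [hjp]; exact List.mem_cons_self
          have hb : (p == (j : Int)) = true := beq_iff_eq.mpr hjp.symm
          have hidx : (p :: rest).idxOf (j : Int) = 0 := by
            rw [List.idxOf_cons, hb, cond_true]
          rw [if_neg hjr, if_pos hmem, hidx, Nat.add_zero]
          congr 1
          rw [List.getD_eq_getElem?_getD, hpj, List.getElem?_set_self hj]
          simp [Int.toNat_natCast]
        · have hmem : (j : Int) ∉ p :: rest := by
            intro h
            rcases List.mem_cons.mp h with h | h
            · exact hjp h
            · exact hjr h
          rw [if_neg hjr, if_neg hmem]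
          have hne : p.toNat ≠ j := by omega
          congr 1
          simp [List.getD_eq_getElem?_getD, List.getElem?_set_ne hne]

-- index of an element in a strictly increasing list = number of smaller elements
theorem idxOf_eq_countP_lt :
    ∀ (ps : List Int), ps.Pairwise (· < ·) → ∀ j : Int, j ∈ ps →
      ps.idxOf j = ps.countP (fun p => decide (p < j)) := by
  intro ps
  induction ps with
  | nil => intro _ j hj; simp at hj
  | cons p rest ih =>
      intro hpw j hj
      have hlt : ∀ q ∈ rest, p < q := (List.pairwise_cons.mp hpw).1
      have hpw' : rest.Pairwise (· < ·) := (List.pairwise_cons.mp hpw).2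
      by_cases hjp : j = p
      · subst hjp
        have h1 : rest.countP (fun q => decide (q < j)) = 0 :=
          List.countP_eq_zero.mpr (by
            intro q hq
            have := hlt q hq
            simp
            omega)
        simp [List.idxOf_cons, List.countP_cons, h1]
      · have hjr : j ∈ rest := by
          rcases List.mem_cons.mp hj with h | h
          · exact absurd h hjp
          · exact h
        have hpj : p < j := hlt j hjr
        have hb : (p == j) = false := beq_eq_false_iff_ne.mpr (by omega)
        rw [List.idxOf_cons, List.countP_cons, ih hpw' j hjr, hb, cond_false]
        simp [hpj]

theorem reverse_vowels_in_sentence_spec : Claim_equal_reverse_vowels_in_sentence := by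
  intro sentence vowels positions _ _
  simp only [Spec_reverse_vowels_in_sentence, reverse_vowels_in_sentence,
    reverse_vowels_in_sentence_alt]
  set cs := sentence.toList with hcs
  set vs := vowels.reverse with hvs
  set n : Int := (cs.length : Int) with hn
  set flt := positions.filter (fun p => decide (0 ≤ p ∧ p < n)) with hflt
  set ps := PySem.List.sorted (PySem.Set.ofList flt) (fun x => x) false with hps
  have hpw : ps.Pairwise (· < ·) := PySem.List.sorted_ofList_pairwise_lt flt
  have hnd : ps.Nodup := hpw.imp (fun h => ne_of_lt h)
  have hmemps : ∀ x : Int, x ∈ ps ↔ (x ∈ positions ∧ 0 ≤ x ∧ x < n) := by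
    intro x
    rw [hps, PySem.List.mem_sorted, PySem.Set.mem_ofList, hflt, List.mem_filter]
    simp
    try tauto
  have hpos0 : ∀ p ∈ ps, 0 ≤ p := fun p hp => ((hmemps p).mp hp).2.1
  congr 1
  -- A's pieces list = B's chars list
  rw [foldA_eq_goA positions vs (PySem.List.enumerate cs) [] 0, List.nil_append]
  apply List.ext_getElem?
  intro j
  by_cases hj : j < cs.length
  · have hA := getElem?_goA positions vs cs 0 0 j hj
    have hB := getElem?_foldB vs ps 0 (cs.map (fun c => String.mk [c]))
      hnd hpos0 j (by simpa using hj)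
    rw [show ((0 : Nat) : Int) = (0 : Int) from rfl] at hB
    rw [hA, hB]
    by_cases hmem : (j : Int) ∈ positions
    · have hjn : (j : Int) < n := by rw [hn]; exact_mod_cast hj
      have hjin : (j : Int) ∈ ps := (hmemps _).mpr ⟨hmem, by positivity, hjn⟩
      rw [if_pos (by simpa using hmem), if_pos hjin]
      congr 2
      -- 0 + countM positions 0 j = 0 + ps.idxOf j
      rw [Nat.zero_add, Nat.zero_add, idxOf_eq_countP_lt ps hpw _ hjin]
      -- countM = countP of smaller elements of ps
      have hperm : (ps.filter (fun p => decide (p < (j : Int)))).Perm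
          (((List.range j).filter (fun t : Nat => decide (((0 : Int) + (t : Int)) ∈ positions))).map
            (fun t : Nat => (t : Int))) := by
        apply (List.perm_ext_iff_of_nodup _ _).mpr
        · intro x
          rw [List.mem_filter, hmemps x]
          constructor
          · rintro ⟨⟨hx1, hx2, _⟩, hx4⟩
            have hx4' : x < (j : Int) := by simpa using hx4
            refine List.mem_map.mpr ⟨x.toNat, ?_, by omega⟩
            rw [List.mem_filter, List.mem_range]
            constructor
            · omega
            · simp only [decide_eq_true_eq, Int.zero_add]
              rw [show ((x.toNat : Nat) : Int) = x by omega]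
              exact hx1
          · intro hx
            rcases List.mem_map.mp hx with ⟨t, ht, rfl⟩
            rw [List.mem_filter, List.mem_range] at ht
            have ht2 := ht.2
            simp only [decide_eq_true_eq, Int.zero_add] at ht2
            refine ⟨⟨ht2, by positivity, ?_⟩, by simp; exact_mod_cast ht.1⟩
            have : t < j := ht.1
            omega
        · exact List.Nodup.filter _ hnd
        · exact List.Nodup.map (fun a b h => by exact_mod_cast h)
            (List.Nodup.filter _ (List.nodup_range))
      rw [List.countP_eq_length_filter, hperm.length_eq, List.length_map,
        ← List.countP_eq_length_filter]
      rfl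
    · have hnot : (j : Int) ∉ ps := fun h => hmem ((hmemps _).mp h).1
      rw [if_neg (by simpa using hmem), if_neg hnot]
      congr 1
      rw [List.getD_eq_getElem?_getD, List.getD_eq_getElem?_getD, List.getElem?_map,
        List.getElem?_eq_getElem hj]
      rfl
  · have h1 : (goA positions vs (PySem.List.enumerate cs) 0)[j]? = none := by
      rw [List.getElem?_eq_none]
      rw [length_goA, PySem.List.length_enumerate]
      omega
    have h2 : ((PySem.List.enumerate ps).foldl
        (fun (chs : List String) (kp : Int × Int) => chs.set kp.2.toNat (vs.getD kp.1.toNat ""))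
        (cs.map (fun c => String.mk [c])))[j]? = none := by
      rw [List.getElem?_eq_none]
      rw [length_foldB, List.length_map]
      omega
    rw [h1, h2]

-- ===== VERDICT =====
-- (verdict theorem is reverse_vowels_in_sentence_spec above)
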